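-- pv_equiv track=rewrite | github.com/pypi-data/pypi-mirror-177 | packages/datection/datection-4.0.7.tar.gz/datection-4.0.7/datection/utils.py | group_facebook_hours
-- ===== SOURCE A (Python) =====
-- def group_facebook_hours(fb_hours):
--     out = []
--     previous = []
--     for i, fb_hour in enumerate(fb_hours):
--         if i == len(fb_hours) - 1:
--             previous.append(fb_hour)
--             out.append(previous)
--         elif fb_hour[0][:5] == fb_hours[i + 1][0][:5]:
--             previous.append(fb_hour)
--         else:
--             previous.append(fb_hour)
--             out.append(previous)
--             previous = []
--     return out
-- ===== SOURCE B (Python) =====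
-- def group_facebook_hours(fb_hours):
--     if not fb_hours:
--         return []
--     # staged passes: 1) key of every element, 2) all boundary indices where
--     # the key changes, 3) slice the input at those boundaries
--     keys = [h[0][:5] for h in fb_hours]
--     n = len(fb_hours)
--     cuts = [i for i in range(1, n) if keys[i - 1] != keys[i]]
--     bounds = [0] + cuts + [n]
--     return [fb_hours[a:b] for a, b in zip(bounds, bounds[1:])]
-- ===== Notes on version B (the rewrite author's own statement) =====
-- stated objective: alternative
-- what changed: A's single pass with an index-lookahead comparison, a running 'previous' accumulator and a special last-element branch is replaced by staged passes with no group accumulator at all: compute every element's 5-char key, collect the boundary indices where the key changes, then slice the input list at those boundaries.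
-- outside the precondition, e.g. on group_facebook_hours([[]]): A returns [[[]]], B raises IndexError
import Mathlib
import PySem

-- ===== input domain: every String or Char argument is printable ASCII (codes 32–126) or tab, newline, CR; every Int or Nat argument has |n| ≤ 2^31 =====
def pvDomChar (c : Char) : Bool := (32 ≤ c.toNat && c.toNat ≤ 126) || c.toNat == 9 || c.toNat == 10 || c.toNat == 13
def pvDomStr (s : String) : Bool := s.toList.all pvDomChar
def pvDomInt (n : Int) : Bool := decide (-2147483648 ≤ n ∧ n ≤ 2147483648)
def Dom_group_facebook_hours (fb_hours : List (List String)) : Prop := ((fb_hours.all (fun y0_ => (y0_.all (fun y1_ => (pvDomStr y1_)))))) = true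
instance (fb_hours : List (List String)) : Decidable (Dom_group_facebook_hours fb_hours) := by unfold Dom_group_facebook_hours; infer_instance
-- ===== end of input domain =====

-- B replaces A's single pass (index lookahead, running 'previous' accumulator, special
-- last-element branch) by staged passes with no group accumulator: compute all keys,
-- collect the boundary indices where the key changes, then slice the input there
-- (alternative decomposition, same O(n) cost).

-- the key h[0][:5] used by both programs; h[0] raises IndexError on an empty inner list
-- (excluded by Pre_), so the .getD default is never reached inside Pre_
def pvKey (h : List String) : String :=
  PySem.Str.slice ((PySem.List.pyGet? h 0).getD "") none (some 5)

-- ===== PORT A =====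
-- loop body of A: acc = (out, previous), p = (i, fb_hour); the lookahead fb_hours[i+1] is in
-- range whenever the first branch is not taken, so its .getD default is never reached
def pvStepA (full : List (List String))
    (acc : List (List (List String)) × List (List String))
    (p : Int × List String) : List (List (List String)) × List (List String) :=
  if p.1 == (full.length : Int) - 1 then
    (acc.1 ++ [acc.2 ++ [p.2]], acc.2 ++ [p.2])
  else if pvKey p.2 == pvKey ((PySem.List.pyGet? full (p.1 + 1)).getD []) then
    (acc.1, acc.2 ++ [p.2])
  else
    (acc.1 ++ [acc.2 ++ [p.2]], [])

def group_facebook_hours (fb_hours : List (List String)) : List (List (List String)) :=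
  ((PySem.List.enumerate fb_hours 0).foldl (pvStepA fb_hours) ([], [])).1

-- ===== PORT B =====
-- predicate of B's list comprehension 'keys[i-1] != keys[i]'; i ranges over range(1, n),
-- so both indices are in range and the .getD defaults are never reached
def pvCutPred (keys : List String) (i : Int) : Bool :=
  !(((PySem.List.pyGet? keys (i - 1)).getD "") == ((PySem.List.pyGet? keys i).getD ""))

def group_facebook_hours_alt (fb_hours : List (List String)) : List (List (List String)) :=
  if fb_hours = [] then []
  else
    let keys := fb_hours.map pvKey
    let n : Int := fb_hours.length
    let cuts := (PySem.List.pyRange 1 n 1).filter (pvCutPred keys)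
    let bounds := 0 :: (cuts ++ [n])
    (bounds.zip bounds.tail).map (fun p => PySem.List.slice fb_hours (some p.1) (some p.2))

-- ===== PRECONDITION & SPEC =====
-- Pre_ excludes inputs containing an empty inner list: there B (the keys pass) raises
-- IndexError on h[0], and A raises too except when the empty inner list is the sole element.
def Pre_group_facebook_hours (fb_hours : List (List String)) : Prop :=
  ∀ h ∈ fb_hours, h ≠ []
instance (fb_hours : List (List String)) : Decidable (Pre_group_facebook_hours fb_hours) := by
  unfold Pre_group_facebook_hours; infer_instance
def pvWitness_group_facebook_hours : List (List String) :=
  [["09:00 Mon"], ["09:00 Tue", "x"], ["10:30 Wed"]]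

def Spec_group_facebook_hours (fb_hours : List (List String)) (out : List (List (List String))) : Prop := out = group_facebook_hours_alt fb_hours
instance (fb_hours : List (List String)) (out : List (List (List String))) : Decidable (Spec_group_facebook_hours fb_hours out) := by unfold Spec_group_facebook_hours; infer_instance

-- ===== CLAIM (what is proved, stated in full; the proofs are below) =====
def Claim_equal_group_facebook_hours : Prop := ∀ (fb_hours : List (List String)), Dom_group_facebook_hours fb_hours → Pre_group_facebook_hours fb_hours → Spec_group_facebook_hours fb_hours (group_facebook_hours fb_hours)

-- ===== LEMMAS AND PROOFS =====

-- proof-side reference function: recursive grouping of maximal runs of equal keys;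
-- both ports are proved equal to it
def pvGroupby : List (List String) → List (List (List String))
  | [] => []
  | h :: t =>
    match pvGroupby t with
    | [] => [[h]]
    | g :: gs => if pvKey h == pvKey (g.headD []) then (h :: g) :: gs else [h] :: g :: gs

-- the first group produced by pvGroupby on z :: t starts with z
theorem pvGroupby_cons_head (t : List (List String)) (z : List String) :
    ∃ r gs, pvGroupby (z :: t) = (z :: r) :: gs := by
  induction t generalizing z with
  | nil => exact ⟨[], [], rfl⟩
  | cons w t' ih =>
    obtain ⟨r, gs, h⟩ := ih w
    rw [show pvGroupby (z :: w :: t') = (match pvGroupby (w :: t') with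
      | [] => [[z]]
      | g :: gs => if pvKey z == pvKey (g.headD []) then (z :: g) :: gs else [z] :: g :: gs) from rfl, h]
    by_cases hk : pvKey z = pvKey w
    · exact ⟨w :: r, gs, by simp [hk]⟩
    · exact ⟨[], (w :: r) :: gs, by simp [hk]⟩

-- ---------- A-side: the fold equals pvGroupby ----------

-- pvGroupby with the pending accumulator 'prev' attached to the front of the first group
def pvAux (s : List (List String)) (prev : List (List String)) : List (List (List String)) :=
  match pvGroupby s with
  | [] => []
  | g :: gs => (prev ++ g) :: gs

-- invariant of A's loop: running the tail of the loop from index j with state (out, prev)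
-- appends pvAux of the remaining suffix
theorem foldA_suffix (full : List (List String)) :
    ∀ (s : List (List String)) (j : Nat), full.drop j = s →
    ∀ (out : List (List (List String))) (prev : List (List String)),
      ((PySem.List.enumerate s (j : Int)).foldl (pvStepA full) (out, prev)).1
        = out ++ pvAux s prev := by
  intro s
  induction s with
  | nil => intro j _ out prev; simp [PySem.List.enumerate_nil, pvAux, pvGroupby]
  | cons y s' ih =>
    intro j hdrop out prev
    have hjlt : j < full.length := by
      by_contra h
      simp [List.drop_eq_nil_of_le (Nat.le_of_not_lt h)] at hdrop
    have hlen : full.length - j = s'.length + 1 := by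
      have h0 : (full.drop j).length = (y :: s').length := by rw [hdrop]
      rw [List.length_drop] at h0
      simpa using h0
    rw [PySem.List.enumerate_cons, List.foldl_cons]
    have hcast : ((j : Int) + 1) = ((j + 1 : Nat) : Int) := by push_cast; ring
    cases s' with
    | nil =>
      have hlen' : full.length = j + 1 := by simp at hlen; omega
      have hcond : ((j : Int) == (full.length : Int) - 1) = true := by
        simp only [beq_iff_eq]; omega
      have hstep : pvStepA full (out, prev) ((j : Int), y)
          = (out ++ [prev ++ [y]], prev ++ [y]) := by
        simp [pvStepA, hcond]
      rw [hstep, PySem.List.enumerate_nil, List.foldl_nil]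
      simp [pvAux, pvGroupby]
    | cons z t =>
      have hlen' : full.length = j + t.length + 2 := by simp at hlen; omega
      have hcond : ((j : Int) == (full.length : Int) - 1) = false := by
        simp only [beq_eq_false_iff_ne, ne_eq]
        intro h
        have : (j : Int) = (full.length : Int) - 1 := h
        omega
      have htl : full.drop (j + 1) = z :: t := by
        rw [← List.tail_drop, hdrop]; rfl
      have hget : PySem.List.pyGet? full ((j : Int) + 1) = some z := by
        have h2 : full[j+1]? = some z := by
          have h3 : (List.drop (j+1) full)[0]? = full[j+1+0]? := List.getElem?_drop
          rw [htl] at h3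
          simpa using h3.symm
        rw [hcast, PySem.List.pyGet?_natCast, h2]
      obtain ⟨r, gs, hg⟩ := pvGroupby_cons_head t z
      by_cases hk : pvKey y = pvKey z
      · have hstep : pvStepA full (out, prev) ((j : Int), y) = (out, prev ++ [y]) := by
          simp [pvStepA, hcond, hget, hk]
        rw [hstep, hcast, ih (j+1) htl out (prev ++ [y])]
        have hG : pvGroupby (y :: z :: t) = (y :: z :: r) :: gs := by
          rw [show pvGroupby (y :: z :: t) = (match pvGroupby (z :: t) with
            | [] => [[y]]
            | g :: gs => if pvKey y == pvKey (g.headD []) then (y :: g) :: gs else [y] :: g :: gs) from rfl, hg]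
          simp [hk]
        simp [pvAux, hg, hG]
      · have hstep : pvStepA full (out, prev) ((j : Int), y) = (out ++ [prev ++ [y]], []) := by
          simp [pvStepA, hcond, hget, hk]
        rw [hstep, hcast, ih (j+1) htl (out ++ [prev ++ [y]]) []]
        have hG : pvGroupby (y :: z :: t) = [y] :: (z :: r) :: gs := by
          rw [show pvGroupby (y :: z :: t) = (match pvGroupby (z :: t) with
            | [] => [[y]]
            | g :: gs => if pvKey y == pvKey (g.headD []) then (y :: g) :: gs else [y] :: g :: gs) from rfl, hg]
          simp [hk]
        simp [pvAux, hg, hG]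

theorem portA_eq_groupby (fb : List (List String)) :
    group_facebook_hours fb = pvGroupby fb := by
  unfold group_facebook_hours
  have h := foldA_suffix fb fb 0 (by simp) [] []
  simp only [Nat.cast_zero] at h
  rw [h]
  cases hg : pvGroupby fb with
  | nil => simp [pvAux, hg]
  | cons g gs => simp [pvAux, hg]

-- ---------- B-side: the boundary-slicing construction equals pvGroupby ----------

-- the cut-index list of B, as its own function
def pvCutsOf (fb : List (List String)) : List Int :=
  (PySem.List.pyRange 1 (fb.length : Int) 1).filter (pvCutPred (fb.map pvKey))

theorem altB_eq (fb : List (List String)) (h : fb ≠ []) :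
    group_facebook_hours_alt fb
      = ((0 :: (pvCutsOf fb ++ [(fb.length : Int)])).zip (pvCutsOf fb ++ [(fb.length : Int)])).map
          (fun p => PySem.List.slice fb (some p.1) (some p.2)) := by
  unfold group_facebook_hours_alt pvCutsOf
  simp [h]

-- shifting a slice past the head
theorem slice_shift (y : List String) (rest : List (List String)) (a b : Int)
    (ha : 0 ≤ a) (hb : 0 ≤ b) :
    PySem.List.slice (y :: rest) (some (a + 1)) (some (b + 1))
      = PySem.List.slice rest (some a) (some b) := by
  rw [PySem.List.slice_toNat _ (by omega) (by omega),
      PySem.List.slice_toNat _ ha hb]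
  have h1 : (a + 1).toNat = a.toNat + 1 := by omega
  have h2 : (b + 1).toNat = b.toNat + 1 := by omega
  rw [h1, h2]
  simp

theorem slice_zero_succ (y : List String) (rest : List (List String)) (b : Int) (hb : 0 ≤ b) :
    PySem.List.slice (y :: rest) (some 0) (some (b + 1))
      = y :: PySem.List.slice rest (some 0) (some b) := by
  rw [PySem.List.slice_toNat _ (by omega) (by omega),
      PySem.List.slice_toNat _ le_rfl hb]
  have h2 : (b + 1).toNat = b.toNat + 1 := by omega
  rw [h2]
  simp [List.take_succ_cons]

-- every cut index is at least 1
theorem pvCutsOf_pos (fb : List (List String)) :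
    ∀ x ∈ pvCutsOf fb, 1 ≤ x := by
  intro x hx
  unfold pvCutsOf at hx
  have := List.of_mem_filter hx
  have hmem := List.mem_of_mem_filter hx
  exact (PySem.List.mem_pyRange_one.mp hmem).1

-- pvCutsOf in Nat-indexed form
theorem pvCutsOf_eq (fb : List (List String)) :
    pvCutsOf fb
      = ((List.range (fb.length - 1)).filter
            (fun k : Nat => pvCutPred (fb.map pvKey) (1 + (k : Int)))).map
          (fun k : Nat => 1 + (k : Int)) := by
  unfold pvCutsOf
  rw [PySem.List.pyRange_one, List.filter_map]
  have h : ((fb.length : Int) - 1).toNat = fb.length - 1 := by omega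
  rw [h]
  rfl

-- the comprehension predicate, shifted past the head of the list
theorem pvCutPred_shift (y : List String) (rest : List (List String)) (k : Nat) :
    pvCutPred ((y :: rest).map pvKey) (1 + ((k + 1 : Nat) : Int))
      = pvCutPred (rest.map pvKey) (1 + (k : Int)) := by
  unfold pvCutPred
  have e1 : 1 + ((k + 1 : Nat) : Int) - 1 = ((k + 1 : Nat) : Int) := by omega
  have e2 : 1 + ((k + 1 : Nat) : Int) = ((k + 2 : Nat) : Int) := by omega
  have e3 : 1 + (k : Int) - 1 = ((k : Nat) : Int) := by omega
  have e4 : 1 + (k : Int) = ((k + 1 : Nat) : Int) := by omega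
  rw [e1, e2, e3, e4, PySem.List.pyGet?_natCast, PySem.List.pyGet?_natCast,
      PySem.List.pyGet?_natCast, PySem.List.pyGet?_natCast]
  simp

theorem pvCutPred_head (y z : List String) (t : List (List String)) :
    pvCutPred ((y :: z :: t).map pvKey) (1 + ((0 : Nat) : Int))
      = !(pvKey y == pvKey z) := by
  unfold pvCutPred
  have e1 : 1 + ((0 : Nat) : Int) - 1 = ((0 : Nat) : Int) := by omega
  have e2 : 1 + ((0 : Nat) : Int) = ((1 : Nat) : Int) := by omega
  rw [e1, e2, PySem.List.pyGet?_natCast, PySem.List.pyGet?_natCast]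
  simp

-- the cut list of y :: rest in terms of the cut list of rest
theorem pvCutsOf_cons (y z : List String) (t : List (List String)) :
    pvCutsOf (y :: z :: t)
      = (if pvKey y == pvKey z then ([] : List Int) else [1])
          ++ (pvCutsOf (z :: t)).map (fun x : Int => x + 1) := by
  rw [pvCutsOf_eq, pvCutsOf_eq]
  have hlen : (y :: z :: t).length - 1 = ((z :: t).length - 1) + 1 := by simp
  rw [hlen, List.range_succ_eq_map, List.filter_cons, List.filter_map]
  have hshift : ∀ k ∈ List.range ((z :: t).length - 1),
      ((fun k : Nat => pvCutPred ((y :: z :: t).map pvKey) (1 + (k : Int))) ∘ Nat.succ) k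
        = pvCutPred ((z :: t).map pvKey) (1 + (k : Int)) := by
    intro k _
    exact pvCutPred_shift y (z :: t) k
  rw [List.filter_congr hshift, pvCutPred_head]
  by_cases hk : pvKey y = pvKey z
  · have hbeq : (pvKey y == pvKey z) = true := by simp [hk]
    simp only [hbeq, Bool.not_true, Bool.false_eq_true, if_false, if_true,
      List.nil_append, List.map_map]
    apply List.map_congr_left
    intro k _
    simp only [Function.comp]
    omega
  · have hbeq : (pvKey y == pvKey z) = false := by simp [hk]
    simp only [hbeq, Bool.not_false, if_true, Bool.false_eq_true, if_false,
      List.map_cons, List.map_map, List.singleton_append, Nat.cast_zero]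
    congr 1

-- master lemma: B's staged construction equals pvGroupby
theorem altB_eq_groupby (fb : List (List String)) :
    group_facebook_hours_alt fb = pvGroupby fb := by
  induction fb with
  | nil => rfl
  | cons y rest ih =>
    cases rest with
    | nil =>
      rw [altB_eq [y] (by simp)]
      have hc : pvCutsOf [y] = [] := by
        unfold pvCutsOf
        rw [PySem.List.pyRange_one_eq_nil (by simp)]
        rfl
      rw [hc]
      simp only [List.nil_append, List.zip_cons_cons, List.zip_nil_right, List.map_cons,
        List.map_nil]
      rw [show ((([y] : List (List String)).length : Int)) = 0 + 1 by simp,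
        slice_zero_succ y [] 0 le_rfl]
      rw [PySem.List.slice_toNat _ le_rfl le_rfl]
      rfl
    | cons z t =>
      obtain ⟨m, e₂, he⟩ : ∃ m e₂,
          pvCutsOf (z :: t) ++ [(((z :: t).length : Nat) : Int)] = m :: e₂ := by
        cases pvCutsOf (z :: t) <;> exact ⟨_, _, rfl⟩
      have hnn : ∀ x ∈ m :: e₂, 0 ≤ x := by
        rw [← he]
        intro x hx
        rcases List.mem_append.mp hx with h | h
        · have := pvCutsOf_pos (z :: t) x h; omega
        · simp at h; omega
      have hm0 : 0 ≤ m := hnn m (by simp)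
      have hIH : ((0 :: m :: e₂).zip (m :: e₂)).map
            (fun p => PySem.List.slice (z :: t) (some p.1) (some p.2))
          = pvGroupby (z :: t) := by
        rw [← ih, altB_eq (z :: t) (by simp), he]
      obtain ⟨r, gs, hg⟩ := pvGroupby_cons_head t z
      rw [hg] at hIH
      simp only [List.zip_cons_cons, List.map_cons] at hIH
      obtain ⟨hhead, htail⟩ := List.cons_eq_cons.mp hIH
      -- the shifted tail pairs slice the extended list like the original pairs slice the tail
      have htails : (((m + 1) :: e₂.map (fun x : Int => x + 1)).zip (e₂.map (fun x : Int => x + 1))).map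
            (fun p => PySem.List.slice (y :: z :: t) (some p.1) (some p.2))
          = ((m :: e₂).zip e₂).map
            (fun p => PySem.List.slice (z :: t) (some p.1) (some p.2)) := by
        have hmc : (m + 1) :: e₂.map (fun x : Int => x + 1)
            = (m :: e₂).map (fun x : Int => x + 1) := rfl
        rw [hmc, List.zip_map, List.map_map]
        apply List.map_congr_left
        intro p hp
        have h1 : 0 ≤ p.1 := hnn p.1 (List.of_mem_zip hp).1
        have h2 : 0 ≤ p.2 := hnn p.2 (List.mem_of_mem_tail (List.of_mem_zip hp).2)
        simp only [Function.comp, Prod.map]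
        exact slice_shift y (z :: t) p.1 p.2 h1 h2
      rw [altB_eq (y :: z :: t) (by simp), pvCutsOf_cons y z t]
      have hlen2 : ((((y :: z :: t).length : Nat)) : Int) = (((z :: t).length : Nat) : Int) + 1 := by
        simp
      rw [hlen2]
      have hGB : pvGroupby (y :: z :: t) = (match pvGroupby (z :: t) with
          | [] => [[y]]
          | g :: gs => if pvKey y == pvKey (g.headD []) then (y :: g) :: gs
                       else [y] :: g :: gs) := rfl
      by_cases hk : pvKey y = pvKey z
      · have hE : ((if pvKey y == pvKey z then ([] : List Int) else [1])
              ++ (pvCutsOf (z :: t)).map (fun x : Int => x + 1))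
              ++ [(((z :: t).length : Nat) : Int) + 1]
            = (m :: e₂).map (fun x : Int => x + 1) := by
          rw [if_pos (by simp [hk]), List.nil_append, ← he, List.map_append]
          simp
        rw [hE]
        simp only [List.map_cons, List.zip_cons_cons, List.map_cons]
        rw [htails, htail, slice_zero_succ y (z :: t) m hm0, hhead]
        rw [hGB, hg]
        simp [hk]
      · have hE : ((if pvKey y == pvKey z then ([] : List Int) else [1])
              ++ (pvCutsOf (z :: t)).map (fun x : Int => x + 1))
              ++ [(((z :: t).length : Nat) : Int) + 1]
            = 1 :: (m :: e₂).map (fun x : Int => x + 1) := by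
          rw [if_neg (by simp [hk])]
          rw [show ([1] : List Int) ++ (pvCutsOf (z :: t)).map (fun x : Int => x + 1)
              = 1 :: (pvCutsOf (z :: t)).map (fun x : Int => x + 1) from rfl]
          rw [List.cons_append, ← he, List.map_append]
          simp
        rw [hE]
        simp only [List.map_cons, List.zip_cons_cons, List.map_cons]
        rw [htails, htail]
        have hs1 : PySem.List.slice (y :: z :: t) (some 0) (some 1) = [y] := by
          rw [show (1 : Int) = 0 + 1 from rfl, slice_zero_succ y (z :: t) 0 le_rfl]
          rw [PySem.List.slice_toNat _ le_rfl le_rfl]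
          rfl
        have hs2 : PySem.List.slice (y :: z :: t) (some 1) (some (m + 1)) = z :: r := by
          have h := slice_shift y (z :: t) 0 m le_rfl hm0
          have h01 : (0 : Int) + 1 = 1 := by norm_num
          rw [h01] at h
          rw [h, hhead]
        rw [hs1, hs2]
        rw [hGB, hg]
        simp [hk]

-- ===== VERDICT (by name: the statement is the Claim_ definition above) =====
theorem group_facebook_hours_spec : Claim_equal_group_facebook_hours := by
  intro fb_hours _ _
  unfold Spec_group_facebook_hours
  rw [portA_eq_groupby, altB_eq_groupby]
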